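-- pv_equiv track=rewrite | github.com/zelic1991/ultimate_norbi_assistant | src/templates.py | suggest_template
-- ===== SOURCE A (Python) =====
-- from typing import Dict, List, Optional
--
-- def suggest_template(context: str, requirements: List[str] = None) -> List[str]:
--     """
--     Suggest appropriate templates based on context and requirements.
--
--     Args:
--         context: Description of what needs to be built
--         requirements: List of specific requirements
--
--     Returns:
--         List of suggested template names, ordered by relevance
--     """
--     context_lower = context.lower()
--     requirements = requirements or []
--
--     suggestions = []
--
--     # Check for API/web service indicators
--     if any(word in context_lower for word in ['api', 'rest', 'web', 'service', 'endpoint']):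
--         suggestions.append('fastapi')
--
--     # Check for worker/CLI indicators
--     if any(word in context_lower for word in ['worker', 'cli', 'command', 'background', 'task']):
--         suggestions.append('worker')
--
--     # Check for frontend indicators
--     if any(word in context_lower for word in ['frontend', 'ui', 'react', 'component', 'web app']):
--         suggestions.append('react')
--
--     # Check for library indicators
--     if any(word in context_lower for word in ['library', 'package', 'module', 'utility']):
--         suggestions.append('python_lib')
--
--     # Check requirements for specific technologies
--     for req in requirements:
--         req_lower = req.lower()
--         if 'fastapi' in req_lower or 'api' in req_lower:
--             if 'fastapi' not in suggestions:
--                 suggestions.append('fastapi')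
--         elif 'react' in req_lower or 'frontend' in req_lower:
--             if 'react' not in suggestions:
--                 suggestions.append('react')
--         elif 'worker' in req_lower or 'cli' in req_lower:
--             if 'worker' not in suggestions:
--                 suggestions.append('worker')
--
--     # If no specific suggestions, suggest python_lib as default
--     if not suggestions:
--         suggestions.append('python_lib')
--
--     return suggestions
-- ===== SOURCE B (Python) =====
-- CTX_RULES = [
--     ('fastapi', ['api', 'rest', 'web', 'service', 'endpoint']),
--     ('worker', ['worker', 'cli', 'command', 'background', 'task']),
--     ('react', ['frontend', 'ui', 'react', 'component', 'web app']),
--     ('python_lib', ['library', 'package', 'module', 'utility']),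
-- ]
--
--
-- def _req_target(rl):
--     """Template a (lowered) requirement string selects, by the fastapi/react/worker precedence."""
--     if 'fastapi' in rl or 'api' in rl:
--         return 'fastapi'
--     if 'react' in rl or 'frontend' in rl:
--         return 'react'
--     if 'worker' in rl or 'cli' in rl:
--         return 'worker'
--     return None
--
--
-- def _req_rank(name, reqs):
--     """Rank of the first requirement selecting `name`, offset past the context ranks."""
--     for j, r in enumerate(reqs):
--         if _req_target(r) == name:
--             return len(CTX_RULES) + j
--     return None
--
--
-- def suggest_template(context, requirements=None):
--     # Per-template scoring: each template gets at most one rank (context position,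
--     # else first selecting requirement); the answer is the ranked templates sorted by rank.
--     ctx = context.lower()
--     reqs = [r.lower() for r in (requirements or [])]
--     ranked = []
--     for i, (name, kws) in enumerate(CTX_RULES):
--         rank = i if any(k in ctx for k in kws) else _req_rank(name, reqs)
--         if rank is not None:
--             ranked.append((rank, name))
--     ranked.sort(key=lambda p: p[0])
--     return [name for _, name in ranked] or ['python_lib']
-- ===== Notes on version B (the rewrite author's own statement) =====
-- stated objective: alternative
-- what changed: Replaces A's sequential append-with-dedup construction by per-template scoring: each template independently gets at most one rank (its context position, else the index of the first requirement selecting it) and the result is the ranked templates sorted by rank, so no output list is mutated and no membership dedup is needed.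
import Mathlib
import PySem

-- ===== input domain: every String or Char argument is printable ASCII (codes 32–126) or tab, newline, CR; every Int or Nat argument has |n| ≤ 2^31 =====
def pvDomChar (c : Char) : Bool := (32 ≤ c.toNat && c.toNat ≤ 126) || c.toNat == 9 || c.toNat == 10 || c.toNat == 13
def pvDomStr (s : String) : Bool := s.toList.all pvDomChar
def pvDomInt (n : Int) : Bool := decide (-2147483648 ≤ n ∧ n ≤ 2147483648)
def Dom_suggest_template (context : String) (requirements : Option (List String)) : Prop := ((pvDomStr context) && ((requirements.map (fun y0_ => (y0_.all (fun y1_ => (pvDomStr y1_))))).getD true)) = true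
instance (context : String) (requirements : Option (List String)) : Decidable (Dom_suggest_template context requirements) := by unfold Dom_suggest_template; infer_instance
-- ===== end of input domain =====

-- B replaces A's sequential append-with-dedup construction by per-template scoring:
-- each template gets at most one rank (context position, else first selecting requirement)
-- and the result is the ranked templates sorted by rank; same cost, different algorithm.


-- ===== PORT A =====
def suggest_template (context : String) (requirements : Option (List String)) : List String :=
  let context_lower := PySem.Str.lower context
  let reqs := requirements.getD []   -- `requirements or []` (None and [] both give [])
  let suggestions : List String := []
  let suggestions :=
    if (["api", "rest", "web", "service", "endpoint"].any
        (fun word => PySem.Str.isIn word context_lower)) then suggestions ++ ["fastapi"] else suggestions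
  let suggestions :=
    if (["worker", "cli", "command", "background", "task"].any
        (fun word => PySem.Str.isIn word context_lower)) then suggestions ++ ["worker"] else suggestions
  let suggestions :=
    if (["frontend", "ui", "react", "component", "web app"].any
        (fun word => PySem.Str.isIn word context_lower)) then suggestions ++ ["react"] else suggestions
  let suggestions :=
    if (["library", "package", "module", "utility"].any
        (fun word => PySem.Str.isIn word context_lower)) then suggestions ++ ["python_lib"] else suggestions
  let suggestions := reqs.foldl (fun suggestions req =>
    let req_lower := PySem.Str.lower req
    if PySem.Str.isIn "fastapi" req_lower || PySem.Str.isIn "api" req_lower then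
      (if !(suggestions.contains "fastapi") then suggestions ++ ["fastapi"] else suggestions)
    else if PySem.Str.isIn "react" req_lower || PySem.Str.isIn "frontend" req_lower then
      (if !(suggestions.contains "react") then suggestions ++ ["react"] else suggestions)
    else if PySem.Str.isIn "worker" req_lower || PySem.Str.isIn "cli" req_lower then
      (if !(suggestions.contains "worker") then suggestions ++ ["worker"] else suggestions)
    else suggestions) suggestions
  if suggestions = [] then ["python_lib"] else suggestions

-- ===== PORT B =====
def pyCtxRules : List (String × List String) :=
  [("fastapi", ["api", "rest", "web", "service", "endpoint"]),
   ("worker", ["worker", "cli", "command", "background", "task"]),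
   ("react", ["frontend", "ui", "react", "component", "web app"]),
   ("python_lib", ["library", "package", "module", "utility"])]

-- _req_target of Source B (argument already lowered)
def pyReqTarget (rl : String) : Option String :=
  if PySem.Str.isIn "fastapi" rl || PySem.Str.isIn "api" rl then some "fastapi"
  else if PySem.Str.isIn "react" rl || PySem.Str.isIn "frontend" rl then some "react"
  else if PySem.Str.isIn "worker" rl || PySem.Str.isIn "cli" rl then some "worker"
  else none

-- _req_rank's `for j, r in enumerate(reqs)` loop of Source B (len(CTX_RULES) = 4)
def pyReqRankLoop (name : String) : List (Int × String) → Option Int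
  | [] => none
  | (j, r) :: rest => if pyReqTarget r = some name then some (4 + j) else pyReqRankLoop name rest

def pyReqRank (name : String) (reqs : List String) : Option Int :=
  pyReqRankLoop name (PySem.List.enumerate reqs 0)

def suggest_template_alt (context : String) (requirements : Option (List String)) : List String :=
  let ctx := PySem.Str.lower context
  let reqs := (requirements.getD []).map PySem.Str.lower
  let ranked := (PySem.List.enumerate pyCtxRules 0).foldl (fun ranked p =>
    let rank := if p.2.2.any (fun k => PySem.Str.isIn k ctx) then some p.1
                else pyReqRank p.2.1 reqs
    match rank with
    | some rk => ranked ++ [(rk, p.2.1)]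
    | none => ranked) ([] : List (Int × String))
  let res := (PySem.List.sorted ranked (fun p => p.1) false).map (fun p => p.2)
  if res = [] then ["python_lib"] else res

-- ===== PRECONDITION & SPEC =====
def Spec_suggest_template (context : String) (requirements : Option (List String)) (out : List String) : Prop := out = suggest_template_alt context requirements
instance (context : String) (requirements : Option (List String)) (out : List String) : Decidable (Spec_suggest_template context requirements out) := by unfold Spec_suggest_template; infer_instance

-- ===== CLAIM (what is proved, stated in full; the proofs are below) =====
def Claim_equal_suggest_template : Prop := ∀ (context : String) (requirements : Option (List String)), Dom_suggest_template context requirements → Spec_suggest_template context requirements (suggest_template context requirements)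

-- ===== LEMMAS AND PROOFS =====

-- abstract step of A's requirements loop in terms of the requirement's target
def stepT (s : List String) (t : Option String) : List String :=
  match t with
  | some n => if s.contains n then s else s ++ [n]
  | none => s

lemma stepA_eq (s : List String) (r : String) :
    (let req_lower := PySem.Str.lower r
     if PySem.Str.isIn "fastapi" req_lower || PySem.Str.isIn "api" req_lower then
       (if !(s.contains "fastapi") then s ++ ["fastapi"] else s)
     else if PySem.Str.isIn "react" req_lower || PySem.Str.isIn "frontend" req_lower then
       (if !(s.contains "react") then s ++ ["react"] else s)
     else if PySem.Str.isIn "worker" req_lower || PySem.Str.isIn "cli" req_lower then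
       (if !(s.contains "worker") then s ++ ["worker"] else s)
     else s)
    = stepT s (pyReqTarget (PySem.Str.lower r)) := by
  simp only [pyReqTarget, stepT]
  split_ifs <;> simp_all

-- first-occurrence list of new targets, relative to an already-present list s
def newly (s : List String) : List (Option String) → List String
  | [] => []
  | t :: ts =>
    match t with
    | some n => if s.contains n then newly s ts else n :: newly (s ++ [n]) ts
    | none => newly s ts

lemma foldl_stepT_eq (ts : List (Option String)) (s : List String) :
    ts.foldl stepT s = s ++ newly s ts := by
  induction ts generalizing s with
  | nil => simp [newly]
  | cons t ts ih =>
    cases t with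
    | none => simp [newly, stepT, ih]
    | some n =>
      by_cases h : n ∈ s <;> simp [newly, stepT, h, ih, List.append_assoc]

-- rank loop over an abstract target list
def rkT (name : String) : Int → List (Option String) → Option Int
  | _, [] => none
  | j, t :: ts => if t = some name then some (4 + j) else rkT name (j + 1) ts

def Rk (name : String) (ts : List (Option String)) : Option Int := rkT name 0 ts

lemma pyReqRankLoop_eq (name : String) (reqs : List String) (j : Int) :
    pyReqRankLoop name (PySem.List.enumerate reqs j) = rkT name j (reqs.map pyReqTarget) := by
  induction reqs generalizing j with
  | nil => simp [PySem.List.enumerate_nil, pyReqRankLoop, rkT]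
  | cons r rs ih => simp [PySem.List.enumerate_cons, pyReqRankLoop, rkT, ih]

lemma rkT_shift (name : String) (ts : List (Option String)) (j : Int) :
    rkT name j ts = (rkT name 0 ts).map (· + j) := by
  induction ts generalizing j with
  | nil => simp [rkT]
  | cons t ts ih =>
    simp only [rkT]
    by_cases h : t = some name
    · simp [h]
    · rw [if_neg h, if_neg h, ih (j + 1), show (0 : Int) + 1 = 1 from rfl, ih 1, Option.map_map]
      congr 1; funext x; simp; ring

lemma Rk_cons (name : String) (t : Option String) (ts : List (Option String)) :
    Rk name (t :: ts) = if t = some name then some 4 else (Rk name ts).map (· + 1) := by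
  by_cases h : t = some name <;> simp [Rk, rkT, h, rkT_shift name ts 1]

lemma Rk_isSome_iff (name : String) (ts : List (Option String)) :
    (Rk name ts).isSome = true ↔ some name ∈ ts := by
  induction ts with
  | nil => simp [Rk, rkT]
  | cons t ts ih =>
    rw [Rk_cons]
    by_cases h : t = some name <;> simp [h, ih, eq_comm]

lemma Rk_ge_four (name : String) (ts : List (Option String)) (y : Int)
    (h : Rk name ts = some y) : 4 ≤ y := by
  induction ts generalizing y with
  | nil => simp [Rk, rkT] at h
  | cons t ts ih =>
    rw [Rk_cons] at h
    by_cases ht : t = some name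
    · simp [ht] at h; omega
    · rw [if_neg ht] at h
      rcases Option.map_eq_some_iff.mp h with ⟨x, hx, rfl⟩
      have := ih x hx; omega

lemma mem_newly (a : String) (s : List String) (ts : List (Option String)) :
    a ∈ newly s ts ↔ (¬ a ∈ s ∧ some a ∈ ts) := by
  induction ts generalizing s with
  | nil => simp [newly]
  | cons t ts ih =>
    cases t with
    | none => simp [newly, ih]
    | some n =>
      by_cases h : s.contains n
      · have hn : n ∈ s := by simpa using h
        simp only [newly, h, if_pos, ih, List.mem_cons]
        constructor
        · rintro ⟨hns, hts⟩; exact ⟨hns, Or.inr hts⟩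
        · rintro ⟨hns, h1 | h2⟩
          · have : a = n := Option.some.inj h1
            subst this; exact absurd hn hns
          · exact ⟨hns, h2⟩
      · have hn : ¬ n ∈ s := by simpa using h
        simp only [newly, h, Bool.false_eq_true, if_neg, not_false_iff, List.mem_cons, ih,
          List.mem_append]
        constructor
        · rintro (rfl | ⟨hna, hts⟩)
          · exact ⟨hn, Or.inl rfl⟩
          · exact ⟨fun hs => hna (Or.inl hs), Or.inr hts⟩
        · rintro ⟨hna, h1 | h2⟩
          · have : a = n := Option.some.inj h1
            exact Or.inl this
          · by_cases han : a = n
            · exact Or.inl han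
            · refine Or.inr ⟨?_, h2⟩
              rintro (hs | hs)
              · exact hna hs
              · exact han (by simpa using hs)

-- the first-occurrence ranks strictly increase along `newly`
lemma newly_pairwise (s : List String) (ts : List (Option String)) :
    (newly s ts).Pairwise (fun a b => ∀ x y, Rk a ts = some x → Rk b ts = some y → x < y) := by
  induction ts generalizing s with
  | nil => simp [newly]
  | cons t ts ih =>
    cases t with
    | none =>
      refine (ih s).imp_of_mem ?_
      intro a b ha hb hab x y hx hy
      rw [Rk_cons] at hx hy
      have hna : ¬ (none : Option String) = some a := by simp
      have hnb : ¬ (none : Option String) = some b := by simp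
      rw [if_neg hna] at hx; rw [if_neg hnb] at hy
      rcases Option.map_eq_some_iff.mp hx with ⟨x', hx', rfl⟩
      rcases Option.map_eq_some_iff.mp hy with ⟨y', hy', rfl⟩
      have := hab x' y' hx' hy'; omega
    | some n =>
      by_cases h : s.contains n
      · simp only [newly, h, if_pos]
        refine (ih s).imp_of_mem ?_
        intro a b ha hb hab x y hx hy
        have hna : a ∈ newly s ts := ha
        have hnb : b ∈ newly s ts := hb
        have hs : n ∈ s := by simpa using h
        have han : ¬ (some n = some a) := by
          intro he; exact ((mem_newly a s ts).mp hna).1 (Option.some.inj he ▸ hs)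
        have hbn : ¬ (some n = some b) := by
          intro he; exact ((mem_newly b s ts).mp hnb).1 (Option.some.inj he ▸ hs)
        rw [Rk_cons, if_neg han] at hx; rw [Rk_cons, if_neg hbn] at hy
        rcases Option.map_eq_some_iff.mp hx with ⟨x', hx', rfl⟩
        rcases Option.map_eq_some_iff.mp hy with ⟨y', hy', rfl⟩
        have := hab x' y' hx' hy'; omega
      · simp only [newly, h, if_neg, Bool.false_eq_true, not_false_iff]
        constructor
        · -- head n vs every b in the tail
          intro b hb x y hx hy
          have hbmem := (mem_newly b (s ++ [n]) ts).mp hb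
          have hbn : b ≠ n := by intro he; exact hbmem.1 (by simp [he])
          rw [Rk_cons, if_pos rfl] at hx
          have hbn' : ¬ ((some n : Option String) = some b) := by simpa [eq_comm] using hbn
          rw [Rk_cons, if_neg hbn'] at hy
          rcases Option.map_eq_some_iff.mp hy with ⟨y', hy', rfl⟩
          have := Rk_ge_four b ts y' hy'
          have hx4 : x = 4 := by simpa using hx.symm
          omega
        · refine (ih (s ++ [n])).imp_of_mem ?_
          intro a b ha hb hab x y hx hy
          have han : a ≠ n := by intro he; exact ((mem_newly a (s ++ [n]) ts).mp ha).1 (by simp [he])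
          have hbn : b ≠ n := by intro he; exact ((mem_newly b (s ++ [n]) ts).mp hb).1 (by simp [he])
          rw [Rk_cons, if_neg (by simpa [eq_comm] using han)] at hx
          rw [Rk_cons, if_neg (by simpa [eq_comm] using hbn)] at hy
          rcases Option.map_eq_some_iff.mp hx with ⟨x', hx', rfl⟩
          rcases Option.map_eq_some_iff.mp hy with ⟨y', hy', rfl⟩
          have := hab x' y' hx' hy'; omega

lemma newly_nodup (s : List String) (ts : List (Option String)) : (newly s ts).Nodup := by
  have h := newly_pairwise s ts
  refine List.Pairwise.imp_of_mem ?_ h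
  intro a b ha hb hab he
  subst he
  have hsome : (Rk a ts).isSome = true := (Rk_isSome_iff a ts).mpr ((mem_newly a s ts).mp ha).2
  rcases Option.isSome_iff_exists.mp hsome with ⟨x, hx⟩
  exact lt_irrefl x (hab x x hx hx)

-- target strings are among the three template names
lemma pyReqTarget_mem (r n : String) (h : pyReqTarget r = some n) :
    n = "fastapi" ∨ n = "react" ∨ n = "worker" := by
  unfold pyReqTarget at h
  split_ifs at h <;> simp_all


-- the four context conditions and A's context-suggestion list
def cmF (ctx : String) : Bool := ["api", "rest", "web", "service", "endpoint"].any (fun k => PySem.Str.isIn k ctx)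
def cmW (ctx : String) : Bool := ["worker", "cli", "command", "background", "task"].any (fun k => PySem.Str.isIn k ctx)
def cmR (ctx : String) : Bool := ["frontend", "ui", "react", "component", "web app"].any (fun k => PySem.Str.isIn k ctx)
def cmP (ctx : String) : Bool := ["library", "package", "module", "utility"].any (fun k => PySem.Str.isIn k ctx)

def Cctx (ctx : String) : List String :=
  (if cmF ctx then ["fastapi"] else []) ++ (if cmW ctx then ["worker"] else []) ++
  (if cmR ctx then ["react"] else []) ++ (if cmP ctx then ["python_lib"] else [])

def tmplOrder : List String := ["fastapi", "worker", "react", "python_lib"]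

-- the single rank B assigns to each template name
def rv (ctx : String) (ts : List (Option String)) (n : String) : Option Int :=
  if n = "fastapi" then (if cmF ctx then some 0 else Rk n ts)
  else if n = "worker" then (if cmW ctx then some 1 else Rk n ts)
  else if n = "react" then (if cmR ctx then some 2 else Rk n ts)
  else if n = "python_lib" then (if cmP ctx then some 3 else Rk n ts)
  else none

def pairfn (ctx : String) (ts : List (Option String)) (n : String) : Int × String :=
  ((rv ctx ts n).getD 0, n)

lemma rv_f (ctx : String) (ts : List (Option String)) : rv ctx ts "fastapi" = if cmF ctx then some 0 else Rk "fastapi" ts := by simp [rv]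
lemma rv_w (ctx : String) (ts : List (Option String)) : rv ctx ts "worker" = if cmW ctx then some 1 else Rk "worker" ts := by simp [rv]
lemma rv_r (ctx : String) (ts : List (Option String)) : rv ctx ts "react" = if cmR ctx then some 2 else Rk "react" ts := by simp [rv]
lemma rv_p (ctx : String) (ts : List (Option String)) : rv ctx ts "python_lib" = if cmP ctx then some 3 else Rk "python_lib" ts := by simp [rv]

set_option maxHeartbeats 3200000 in
lemma ranked_eq (ctx : String) (rs : List String) :
    (PySem.List.enumerate pyCtxRules 0).foldl (fun ranked p =>
      match (if p.2.2.any (fun k => PySem.Str.isIn k ctx) then some p.1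
             else pyReqRank p.2.1 rs) with
      | some rk => ranked ++ [(rk, p.2.1)]
      | none => ranked) ([] : List (Int × String))
    = (tmplOrder.filter (fun n => (rv ctx (rs.map pyReqTarget) n).isSome)).map
        (pairfn ctx (rs.map pyReqTarget)) := by
  have e : PySem.List.enumerate pyCtxRules 0 =
      [((0 : Int), ("fastapi", ["api", "rest", "web", "service", "endpoint"])),
       (1, ("worker", ["worker", "cli", "command", "background", "task"])),
       (2, ("react", ["frontend", "ui", "react", "component", "web app"])),
       (3, ("python_lib", ["library", "package", "module", "utility"]))] := by
    simp [pyCtxRules, PySem.List.enumerate_cons, PySem.List.enumerate_nil]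
  have hrk : ∀ n, pyReqRank n rs = Rk n (rs.map pyReqTarget) := fun n => pyReqRankLoop_eq n rs 0
  simp only [e, List.foldl_cons, List.foldl_nil, hrk, tmplOrder, List.filter_cons, List.filter_nil,
    (show (["api", "rest", "web", "service", "endpoint"].any fun k => PySem.Str.isIn k ctx) = cmF ctx from rfl),
    (show (["worker", "cli", "command", "background", "task"].any fun k => PySem.Str.isIn k ctx) = cmW ctx from rfl),
    (show (["frontend", "ui", "react", "component", "web app"].any fun k => PySem.Str.isIn k ctx) = cmR ctx from rfl),
    (show (["library", "package", "module", "utility"].any fun k => PySem.Str.isIn k ctx) = cmP ctx from rfl),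
    rv_f, rv_w, rv_r, rv_p]
  by_cases hF : cmF ctx <;> by_cases hW : cmW ctx <;> by_cases hR : cmR ctx <;> by_cases hP : cmP ctx <;>
    simp only [hF, hW, hR, hP, if_true, if_false, Bool.false_eq_true] <;>
    rcases h1 : Rk "fastapi" (rs.map pyReqTarget) with _ | x1 <;>
    rcases h2 : Rk "worker" (rs.map pyReqTarget) with _ | x2 <;>
    rcases h3 : Rk "react" (rs.map pyReqTarget) with _ | x3 <;>
    rcases h4 : Rk "python_lib" (rs.map pyReqTarget) with _ | x4 <;>
    simp [pairfn, rv_f, rv_w, rv_r, rv_p, hF, hW, hR, hP, h1, h2, h3, h4]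

lemma mem_Cctx_iff (ctx : String) (n : String) :
    n ∈ Cctx ctx ↔ ((n = "fastapi" ∧ cmF ctx) ∨ (n = "worker" ∧ cmW ctx) ∨
      (n = "react" ∧ cmR ctx) ∨ (n = "python_lib" ∧ cmP ctx)) := by
  unfold Cctx; split_ifs <;> simp_all

lemma Cctx_nodup (ctx : String) : (Cctx ctx).Nodup := by
  unfold Cctx; split_ifs <;> simp_all

lemma rv_of_newly (ctx : String) (rs : List String) (n : String)
    (hn : n ∈ newly (Cctx ctx) (rs.map pyReqTarget)) :
    rv ctx (rs.map pyReqTarget) n = Rk n (rs.map pyReqTarget) := by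
  obtain ⟨hnc, hmem⟩ := (mem_newly n (Cctx ctx) (rs.map pyReqTarget)).mp hn
  rcases List.mem_map.mp hmem with ⟨r, _, hr⟩
  rcases pyReqTarget_mem r n hr with rfl | rfl | rfl
  · by_cases hc : cmF ctx
    · exact absurd ((mem_Cctx_iff ctx _).mpr (Or.inl ⟨rfl, hc⟩)) hnc
    · simp [rv_f, hc]
  · by_cases hc : cmR ctx
    · exact absurd ((mem_Cctx_iff ctx _).mpr (Or.inr (Or.inr (Or.inl ⟨rfl, hc⟩)))) hnc
    · simp [rv_r, hc]
  · by_cases hc : cmW ctx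
    · exact absurd ((mem_Cctx_iff ctx _).mpr (Or.inr (Or.inl ⟨rfl, hc⟩))) hnc
    · simp [rv_w, hc]

lemma perm_names (ctx : String) (rs : List String) :
    (Cctx ctx ++ newly (Cctx ctx) (rs.map pyReqTarget)).Perm
      (tmplOrder.filter (fun n => (rv ctx (rs.map pyReqTarget) n).isSome)) := by
  set ts := rs.map pyReqTarget with hts
  refine (List.perm_ext_iff_of_nodup ?_ ?_).mpr ?_
  · refine (Cctx_nodup ctx).append (newly_nodup _ _) ?_
    intro a ha hb
    exact ((mem_newly a (Cctx ctx) ts).mp hb).1 ha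
  · exact List.Nodup.filter _ (by decide)
  · intro n
    rw [List.mem_append, List.mem_filter]
    constructor
    · rintro (hC | hN)
      · rcases (mem_Cctx_iff ctx n).mp hC with ⟨rfl, hc⟩ | ⟨rfl, hc⟩ | ⟨rfl, hc⟩ | ⟨rfl, hc⟩ <;>
          simp [tmplOrder, rv_f, rv_w, rv_r, rv_p, hc]
      · obtain ⟨hnc, hmem⟩ := (mem_newly n (Cctx ctx) ts).mp hN
        have hrv := rv_of_newly ctx rs n (hts ▸ hN)
        have hsome : (Rk n ts).isSome = true := (Rk_isSome_iff n ts).mpr hmem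
        rcases List.mem_map.mp hmem with ⟨r, _, hr⟩
        rcases pyReqTarget_mem r n hr with rfl | rfl | rfl <;>
          simp_all [tmplOrder]
    · rintro ⟨hord, hsome⟩
      have hord' : n = "fastapi" ∨ n = "worker" ∨ n = "react" ∨ n = "python_lib" := by
        simpa [tmplOrder] using hord
      have hnewly : ¬ n ∈ Cctx ctx → (Rk n ts).isSome = true → n ∈ newly (Cctx ctx) ts :=
        fun h1 h2 => (mem_newly n (Cctx ctx) ts).mpr ⟨h1, (Rk_isSome_iff n ts).mp h2⟩
      rcases hord' with rfl | rfl | rfl | rfl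
      · by_cases hc : cmF ctx
        · exact Or.inl ((mem_Cctx_iff ctx _).mpr (Or.inl ⟨rfl, hc⟩))
        · refine Or.inr (hnewly ?_ ?_)
          · intro hC; rcases (mem_Cctx_iff ctx _).mp hC with ⟨_, h⟩ | ⟨h, _⟩ | ⟨h, _⟩ | ⟨h, _⟩ <;> simp_all
          · simpa [rv_f, hc] using hsome
      · by_cases hc : cmW ctx
        · exact Or.inl ((mem_Cctx_iff ctx _).mpr (Or.inr (Or.inl ⟨rfl, hc⟩)))
        · refine Or.inr (hnewly ?_ ?_)
          · intro hC; rcases (mem_Cctx_iff ctx _).mp hC with ⟨h, _⟩ | ⟨_, h⟩ | ⟨h, _⟩ | ⟨h, _⟩ <;> simp_all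
          · simpa [rv_w, hc] using hsome
      · by_cases hc : cmR ctx
        · exact Or.inl ((mem_Cctx_iff ctx _).mpr (Or.inr (Or.inr (Or.inl ⟨rfl, hc⟩))))
        · refine Or.inr (hnewly ?_ ?_)
          · intro hC; rcases (mem_Cctx_iff ctx _).mp hC with ⟨h, _⟩ | ⟨h, _⟩ | ⟨_, h⟩ | ⟨h, _⟩ <;> simp_all
          · simpa [rv_r, hc] using hsome
      · by_cases hc : cmP ctx
        · exact Or.inl ((mem_Cctx_iff ctx _).mpr (Or.inr (Or.inr (Or.inr ⟨rfl, hc⟩))))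
        · refine Or.inr (hnewly ?_ ?_)
          · intro hC; rcases (mem_Cctx_iff ctx _).mp hC with ⟨h, _⟩ | ⟨h, _⟩ | ⟨h, _⟩ | ⟨_, h⟩ <;> simp_all
          · simpa [rv_p, hc] using hsome

lemma pairwise_names (ctx : String) (rs : List String) :
    (Cctx ctx ++ newly (Cctx ctx) (rs.map pyReqTarget)).Pairwise
      (fun a b => (pairfn ctx (rs.map pyReqTarget) a).1 < (pairfn ctx (rs.map pyReqTarget) b).1) := by
  set ts := rs.map pyReqTarget with hts
  have hCle : ∀ a ∈ Cctx ctx, (pairfn ctx ts a).1 ≤ 3 ∧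
      ∃ i : Int, rv ctx ts a = some i ∧ i ≤ 3 := by
    intro a ha
    rcases (mem_Cctx_iff ctx a).mp ha with ⟨rfl, hc⟩ | ⟨rfl, hc⟩ | ⟨rfl, hc⟩ | ⟨rfl, hc⟩ <;>
      simp [pairfn, rv_f, rv_w, rv_r, rv_p, hc]
  have hNge : ∀ b ∈ newly (Cctx ctx) ts, ∃ y : Int, rv ctx ts b = some y ∧ 4 ≤ y ∧
      Rk b ts = some y := by
    intro b hb
    have hrv := rv_of_newly ctx rs b (hts ▸ hb)
    have hsome : (Rk b ts).isSome = true :=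
      (Rk_isSome_iff b ts).mpr ((mem_newly b (Cctx ctx) ts).mp hb).2
    rcases Option.isSome_iff_exists.mp hsome with ⟨y, hy⟩
    exact ⟨y, by rw [hrv, hy], Rk_ge_four b ts y hy, hy⟩
  rw [List.pairwise_append]
  refine ⟨?_, ?_, ?_⟩
  · unfold Cctx
    split_ifs <;> simp_all [pairfn, rv_f, rv_w, rv_r, rv_p]
  · refine (newly_pairwise (Cctx ctx) ts).imp_of_mem ?_
    intro a b ha hb hab
    obtain ⟨x, hxa, _, hxRk⟩ := hNge a ha
    obtain ⟨y, hyb, _, hyRk⟩ := hNge b hb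
    have := hab x y hxRk hyRk
    simp [pairfn, hxa, hyb, this]
  · intro a ha b hb
    obtain ⟨hle, _⟩ := hCle a ha
    obtain ⟨y, hyb, hy4, _⟩ := hNge b hb
    have : (pairfn ctx ts b).1 = y := by simp [pairfn, hyb]
    omega

def bodyA : List String → String → List String := fun suggestions req =>
  if PySem.Str.isIn "fastapi" (PySem.Str.lower req) || PySem.Str.isIn "api" (PySem.Str.lower req) then
    if !suggestions.contains "fastapi" then suggestions ++ ["fastapi"] else suggestions
  else if PySem.Str.isIn "react" (PySem.Str.lower req) || PySem.Str.isIn "frontend" (PySem.Str.lower req) then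
    if !suggestions.contains "react" then suggestions ++ ["react"] else suggestions
  else if PySem.Str.isIn "worker" (PySem.Str.lower req) || PySem.Str.isIn "cli" (PySem.Str.lower req) then
    if !suggestions.contains "worker" then suggestions ++ ["worker"] else suggestions
  else suggestions

lemma foldl_bodyA (reqs0 : List String) (s : List String) :
    reqs0.foldl bodyA s = s ++ newly s ((reqs0.map PySem.Str.lower).map pyReqTarget) := by
  induction reqs0 generalizing s with
  | nil => simp [newly]
  | cons r rest ih =>
    rw [List.foldl_cons]
    have hb : bodyA s r = stepT s (pyReqTarget (PySem.Str.lower r)) := stepA_eq s r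
    rw [hb, ih, List.map_cons, List.map_cons]
    rw [← foldl_stepT_eq ((rest.map PySem.Str.lower).map pyReqTarget) (stepT s (pyReqTarget (PySem.Str.lower r))),
        ← foldl_stepT_eq (pyReqTarget (PySem.Str.lower r) :: (rest.map PySem.Str.lower).map pyReqTarget) s]
    rfl

lemma snd_pairfn (ctx : String) (ts : List (Option String)) (l : List String) :
    (l.map (pairfn ctx ts)).map (fun p => p.2) = l := by
  induction l with
  | nil => rfl
  | cons a l ih => simp [pairfn, ih]

-- ===== VERDICT (by name: the statement is the Claim_ definition above) =====
theorem suggest_template_spec : Claim_equal_suggest_template := by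
  intro context requirements _
  unfold Spec_suggest_template suggest_template suggest_template_alt
  dsimp only
  rw [show (fun suggestions req =>
      if PySem.Str.isIn "fastapi" (PySem.Str.lower req) || PySem.Str.isIn "api" (PySem.Str.lower req) then
        if !suggestions.contains "fastapi" then suggestions ++ ["fastapi"] else suggestions
      else if PySem.Str.isIn "react" (PySem.Str.lower req) || PySem.Str.isIn "frontend" (PySem.Str.lower req) then
        if !suggestions.contains "react" then suggestions ++ ["react"] else suggestions
      else if PySem.Str.isIn "worker" (PySem.Str.lower req) || PySem.Str.isIn "cli" (PySem.Str.lower req) then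
        if !suggestions.contains "worker" then suggestions ++ ["worker"] else suggestions
      else suggestions) = bodyA from rfl]
  rw [foldl_bodyA]
  rw [ranked_eq (PySem.Str.lower context) ((requirements.getD []).map PySem.Str.lower)]
  rw [PySem.List.sorted_eq_of_perm_of_pairwise_lt _
      ((Cctx (PySem.Str.lower context) ++ newly (Cctx (PySem.Str.lower context))
        (((requirements.getD []).map PySem.Str.lower).map pyReqTarget)).map
        (pairfn (PySem.Str.lower context) (((requirements.getD []).map PySem.Str.lower).map pyReqTarget)))
      (fun p => p.1)
      ((perm_names (PySem.Str.lower context) ((requirements.getD []).map PySem.Str.lower)).map _)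
      (List.pairwise_map.mpr (pairwise_names (PySem.Str.lower context) ((requirements.getD []).map PySem.Str.lower)))]
  rw [snd_pairfn]
  simp only [
    (show (["api", "rest", "web", "service", "endpoint"].any fun word => PySem.Str.isIn word (PySem.Str.lower context)) = cmF (PySem.Str.lower context) from rfl),
    (show (["worker", "cli", "command", "background", "task"].any fun word => PySem.Str.isIn word (PySem.Str.lower context)) = cmW (PySem.Str.lower context) from rfl),
    (show (["frontend", "ui", "react", "component", "web app"].any fun word => PySem.Str.isIn word (PySem.Str.lower context)) = cmR (PySem.Str.lower context) from rfl),
    (show (["library", "package", "module", "utility"].any fun word => PySem.Str.isIn word (PySem.Str.lower context)) = cmP (PySem.Str.lower context) from rfl)]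
  by_cases hF : cmF (PySem.Str.lower context) <;> by_cases hW : cmW (PySem.Str.lower context) <;>
    by_cases hR : cmR (PySem.Str.lower context) <;> by_cases hP : cmP (PySem.Str.lower context) <;>
    simp only [Cctx, hF, hW, hR, hP, if_true, if_false, Bool.false_eq_true, List.nil_append,
      List.append_nil]
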